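-- pv_equiv track=rewrite | github.com/DADMIN1/LocalBat | generate.py | IsolateArrayParameters
-- ===== SOURCE A (Python) =====
-- def IsolateArrayParameters(functionCall: str):
--     found_arrays = []
--     current_string = functionCall.partition('[')[2]
--     while(len(current_string) > 0):
--         (before, sep, after) = current_string.partition(']') # find end of current array
--         if sep == ']': found_arrays.append('{' + before + '}') # ensuring it's not empty (not found)
--         current_string = after.partition('[')[2]
--     return found_arrays
-- ===== SOURCE B (Python) =====
-- def IsolateArrayParameters(functionCall: str):
--     # one-pass state machine over the characters: no repeated partition scans
--     results = []
--     inside = False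
--     buf = []
--     for ch in functionCall:
--         if inside:
--             if ch == ']':
--                 results.append('{' + ''.join(buf) + '}')
--                 inside = False
--                 buf = []
--             else:
--                 buf.append(ch)
--         elif ch == '[':
--             inside = True
--     return results
-- ===== Notes on version B (the rewrite author's own statement) =====
-- stated objective: alternative
-- what changed: Replaced the repeated str.partition loop with a single left-to-right character scan keeping an inside-brackets flag and a buffer; the partition-and-reslice control flow disappears.
import Mathlib
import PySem

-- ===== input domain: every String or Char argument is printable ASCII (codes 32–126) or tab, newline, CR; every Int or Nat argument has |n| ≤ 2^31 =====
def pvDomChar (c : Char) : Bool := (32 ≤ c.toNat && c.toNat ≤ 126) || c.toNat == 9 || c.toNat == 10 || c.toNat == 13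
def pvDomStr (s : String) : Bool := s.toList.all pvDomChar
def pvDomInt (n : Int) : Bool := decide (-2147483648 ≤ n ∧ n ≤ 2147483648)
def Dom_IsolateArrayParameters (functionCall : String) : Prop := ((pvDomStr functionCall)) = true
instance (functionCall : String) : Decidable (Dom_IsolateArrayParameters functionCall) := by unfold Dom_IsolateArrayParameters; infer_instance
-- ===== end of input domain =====

-- B rewrites A's repeated str.partition loop as a single character scan; same value everywhere (alternative, same cost).

-- ===== PORT A =====
-- hand port of s.partition(sep) for a one-character separator (PySem has no partition):
-- returns (before, sep-found?, after); exact: the Python middle component is ']'/'[' iff the flag is true, '' otherwise.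
def partitionChar (sep : Char) : List Char → List Char × Bool × List Char
  | [] => ([], false, [])
  | c :: rest =>
    if c = sep then ([], true, rest)
    else
      let p := partitionChar sep rest
      (c :: p.1, p.2.1, p.2.2)

theorem partitionChar_after_le (sep : Char) (s : List Char) :
    (partitionChar sep s).2.2.length ≤ s.length := by
  induction s with
  | nil => simp [partitionChar]
  | cons c rest ih =>
    simp only [partitionChar]
    split <;> simp <;> omega

theorem partitionChar_found_lt (sep : Char) (s : List Char)
    (h : (partitionChar sep s).2.1 = true) : (partitionChar sep s).2.2.length < s.length := by
  induction s with
  | nil => simp [partitionChar] at h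
  | cons c rest ih =>
    simp only [partitionChar] at h ⊢
    by_cases hc : c = sep
    · simp [hc]
    · simp only [if_neg hc] at h ⊢
      exact Nat.lt_succ_of_lt (ih h)

theorem partitionChar_notfound (sep : Char) (s : List Char)
    (h : (partitionChar sep s).2.1 = false) : (partitionChar sep s).2.2 = [] := by
  induction s with
  | nil => simp [partitionChar]
  | cons c rest ih =>
    simp only [partitionChar] at h ⊢
    split at h <;> simp_all

-- the while-loop of A: state = current_string (as List Char) and found_arrays
def isolateLoopA (cur : List Char) (found : List String) : List String :=
  if hcur : cur = [] then found
  else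
    isolateLoopA (partitionChar '[' (partitionChar ']' cur).2.2).2.2
      (if (partitionChar ']' cur).2.1 then found ++ [String.ofList ('{' :: (partitionChar ']' cur).1 ++ ['}'])] else found)
termination_by cur.length
decreasing_by
  by_cases h : (partitionChar ']' cur).2.1 = true
  · exact Nat.lt_of_le_of_lt (partitionChar_after_le _ _) (partitionChar_found_lt _ _ h)
  · rw [partitionChar_notfound ']' cur (by simpa using h)]
    simp [partitionChar]
    exact List.length_pos_iff.mpr hcur

def IsolateArrayParameters (functionCall : String) : List String :=
  isolateLoopA (partitionChar '[' functionCall.toList).2.2 []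

-- ===== PORT B =====
-- the for-loop of Source B: state = (inside, buf, results)
def scanB (s : List Char) (inside : Bool) (buf : List Char) (res : List String) : List String :=
  match s with
  | [] => res
  | ch :: rest =>
    if inside then
      if ch = ']' then scanB rest false [] (res ++ [String.ofList ('{' :: buf ++ ['}'])])
      else scanB rest true (buf ++ [ch]) res
    else if ch = '[' then scanB rest true [] res
    else scanB rest false buf res

def IsolateArrayParameters_alt (functionCall : String) : List String :=
  scanB functionCall.toList false [] []

-- ===== PRECONDITION & SPEC =====
def Spec_IsolateArrayParameters (functionCall : String) (out : List String) : Prop := out = IsolateArrayParameters_alt functionCall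
instance (functionCall : String) (out : List String) : Decidable (Spec_IsolateArrayParameters functionCall out) := by unfold Spec_IsolateArrayParameters; infer_instance

-- ===== CLAIM (what is proved, stated in full; the proofs are below) =====
def Claim_equal_IsolateArrayParameters : Prop := ∀ (functionCall : String), Dom_IsolateArrayParameters functionCall → Spec_IsolateArrayParameters functionCall (IsolateArrayParameters functionCall)

-- ===== LEMMAS AND PROOFS =====

-- inside mode: scanB consumes up to the first ']' (if any), appending buf ++ before
theorem scanB_inside (cur : List Char) :
    ∀ buf res, scanB cur true buf res =
      if (partitionChar ']' cur).2.1 then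
        scanB (partitionChar ']' cur).2.2 false []
          (res ++ [String.ofList ('{' :: (buf ++ (partitionChar ']' cur).1) ++ ['}'])])
      else res := by
  induction cur with
  | nil => intro buf res; simp [scanB, partitionChar]
  | cons ch rest ih =>
    intro buf res
    by_cases h : ch = ']'
    · subst h; simp [scanB, partitionChar]
    · simp only [scanB, partitionChar, if_neg h, ih (buf ++ [ch]) res]
      simp [List.append_assoc]

-- outside mode: scanB skips up to the first '[' (buf is irrelevant)
theorem scanB_outside (cur : List Char) :
    ∀ buf res, scanB cur false buf res = scanB (partitionChar '[' cur).2.2 true [] res := by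
  induction cur with
  | nil => intro buf res; simp [scanB, partitionChar]
  | cons ch rest ih =>
    intro buf res
    by_cases h : ch = '['
    · subst h; simp [scanB, partitionChar]
    · simp only [scanB, partitionChar, if_neg h, Bool.false_eq_true, if_false, ih buf res]

-- the main correspondence: A's loop (in inside mode) equals B's scan
theorem loopA_eq_scanB (n : ℕ) : ∀ (cur : List Char), cur.length ≤ n →
    ∀ res, isolateLoopA cur res = scanB cur true [] res := by
  induction n with
  | zero =>
    intro cur h res
    have : cur = [] := List.length_eq_zero_iff.mp (Nat.le_zero.mp h)
    subst this; simp [isolateLoopA, scanB]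
  | succ n ih =>
    intro cur h res
    by_cases hcur : cur = []
    · subst hcur; simp [isolateLoopA, scanB]
    · rw [isolateLoopA, dif_neg hcur, scanB_inside]
      by_cases hf : (partitionChar ']' cur).2.1 = true
      · have h1 : (partitionChar '[' (partitionChar ']' cur).2.2).2.2.length ≤ n := by
          have := partitionChar_after_le '[' (partitionChar ']' cur).2.2
          have := partitionChar_found_lt ']' cur hf
          omega
        rw [if_pos hf, ih _ h1, scanB_outside, if_pos hf]
        simp
      · have h0 : (partitionChar ']' cur).2.2 = [] :=
          partitionChar_notfound _ _ (by simpa using hf)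
        rw [if_neg hf, h0]
        simp only [partitionChar]
        rw [ih [] (by simp)]
        simp [scanB, if_neg hf]

-- ===== VERDICT (by name: the statement is the Claim_ definition above) =====
theorem IsolateArrayParameters_spec : Claim_equal_IsolateArrayParameters := by
  intro s _
  unfold Spec_IsolateArrayParameters IsolateArrayParameters IsolateArrayParameters_alt
  rw [scanB_outside, loopA_eq_scanB ((partitionChar '[' s.toList).2.2.length) _ le_rfl]
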